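-- pv_equiv track=rewrite | github.com/iptch/2023-advent-of-code | WGA/05/aoc_template.py | get_dest_ranges
-- ===== SOURCE A (Python) =====
-- def get_dest_ranges(src_ranges, map_ranges):
--     dest_ranges = []
--
--     for src_range in src_ranges:
--         if src_range[0] < map_ranges[0][1]:
--             dest_ranges.append((src_range[0], min(src_range[1], map_ranges[0][1])))
--
--         if src_range[1] > map_ranges[-1][2]:
--             dest_ranges.append((max(src_range[0], map_ranges[-1][2]), src_range[1]))
--
--         for map_range in map_ranges:
--             if src_range[0] < map_range[2] and src_range[1] > map_range[1]:
--                 offset = map_range[0] - map_range[1]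
--                 dest_ranges.append((max(src_range[0], map_range[1]) + offset, min(src_range[1], map_range[2]) + offset))
--
--     return dest_ranges
-- ===== SOURCE B (Python) =====
-- def _bisect_left(a, x):
--     lo, hi = 0, len(a)
--     while lo < hi:
--         mid = (lo + hi) // 2
--         if a[mid] < x:
--             lo = mid + 1
--         else:
--             hi = mid
--     return lo
--
--
-- def get_dest_ranges(src_ranges, map_ranges):
--     # Sorted index + binary search: sort the map indices by range start once; per
--     # source range a binary search on the sorted starts yields exactly the maps
--     # with start < src end, which are then filtered by end > src start and put
--     # back into original map order, replacing A's full inner scan of all maps.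
--     out = []
--     if not src_ranges:
--         return out
--     lo = map_ranges[0][1]
--     hi = map_ranges[-1][2]
--     n = len(map_ranges)
--     order = sorted(range(n), key=lambda i: map_ranges[i][1])
--     starts = [map_ranges[i][1] for i in order]
--     for src in src_ranges:
--         s0, s1 = src[0], src[1]
--         if s0 < lo:
--             out.append((s0, min(s1, lo)))
--         if s1 > hi:
--             out.append((max(s0, hi), s1))
--         k = _bisect_left(starts, s1)
--         for i in sorted(idx for idx in order[:k] if map_ranges[idx][2] > s0):
--             m = map_ranges[i]
--             off = m[0] - m[1]
--             out.append((max(s0, m[1]) + off, min(s1, m[2]) + off))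
--     return out
-- ===== Notes on version B (the rewrite author's own statement) =====
-- stated objective: alternative
-- what changed: B replaces A's full inner scan over all map ranges by a sorted index: it sorts the map indices by range start once, per source range binary-searches the sorted starts for the maps with start < src end, filters those by end > src start and restores original map order, emitting the same boundary pieces and shifted overlap pieces.
import Mathlib
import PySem

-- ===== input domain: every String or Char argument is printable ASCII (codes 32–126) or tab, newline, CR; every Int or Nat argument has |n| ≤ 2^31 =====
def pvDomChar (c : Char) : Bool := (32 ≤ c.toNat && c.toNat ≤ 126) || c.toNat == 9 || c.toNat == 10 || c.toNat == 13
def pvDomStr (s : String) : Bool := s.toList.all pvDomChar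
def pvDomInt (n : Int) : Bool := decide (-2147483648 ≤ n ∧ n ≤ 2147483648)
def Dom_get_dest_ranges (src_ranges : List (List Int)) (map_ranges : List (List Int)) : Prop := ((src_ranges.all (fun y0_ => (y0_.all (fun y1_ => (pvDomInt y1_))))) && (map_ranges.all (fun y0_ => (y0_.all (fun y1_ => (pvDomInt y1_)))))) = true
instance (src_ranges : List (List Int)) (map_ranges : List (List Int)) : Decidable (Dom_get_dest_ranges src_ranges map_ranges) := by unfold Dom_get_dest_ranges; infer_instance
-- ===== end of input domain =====

-- B replaces A's full inner scan of the map list by a start-sorted index plus a binary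
-- search per source range (candidates filtered and restored to map order); objective:
-- alternative structure, same results.

-- ===== PORT A =====
def get_dest_ranges (src_ranges : List (List Int)) (map_ranges : List (List Int)) : List (List Int) :=
  src_ranges.foldl (fun acc src_range =>
    let acc1 :=
      if PySem.List.pyGetD src_range 0 0 < PySem.List.pyGetD (PySem.List.pyGetD map_ranges 0 []) 1 0 then
        acc ++ [[PySem.List.pyGetD src_range 0 0,
                 min (PySem.List.pyGetD src_range 1 0) (PySem.List.pyGetD (PySem.List.pyGetD map_ranges 0 []) 1 0)]]
      else acc
    let acc2 :=
      if PySem.List.pyGetD src_range 1 0 > PySem.List.pyGetD (PySem.List.pyGetD map_ranges (-1) []) 2 0 then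
        acc1 ++ [[max (PySem.List.pyGetD src_range 0 0) (PySem.List.pyGetD (PySem.List.pyGetD map_ranges (-1) []) 2 0),
                  PySem.List.pyGetD src_range 1 0]]
      else acc1
    map_ranges.foldl (fun acc3 map_range =>
      if PySem.List.pyGetD src_range 0 0 < PySem.List.pyGetD map_range 2 0 ∧
         PySem.List.pyGetD src_range 1 0 > PySem.List.pyGetD map_range 1 0 then
        acc3 ++ [[max (PySem.List.pyGetD src_range 0 0) (PySem.List.pyGetD map_range 1 0) +
                    (PySem.List.pyGetD map_range 0 0 - PySem.List.pyGetD map_range 1 0),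
                  min (PySem.List.pyGetD src_range 1 0) (PySem.List.pyGetD map_range 2 0) +
                    (PySem.List.pyGetD map_range 0 0 - PySem.List.pyGetD map_range 1 0)]]
      else acc3) acc2) []

-- ===== PORT B =====
-- hand-written bisect_left of Source B (the while loop, as recursion on hi - lo)
def pvBisectLoop (a : List Int) (x : Int) (lo hi : Nat) : Nat :=
  if lo < hi then
    let mid := (lo + hi) / 2
    if PySem.List.pyGetD a (mid : Int) 0 < x then pvBisectLoop a x (mid + 1) hi
    else pvBisectLoop a x lo mid
  else lo
termination_by hi - lo
decreasing_by all_goals omega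

def pvBisectLeft (a : List Int) (x : Int) : Nat := pvBisectLoop a x 0 a.length

def get_dest_ranges_alt (src_ranges : List (List Int)) (map_ranges : List (List Int)) : List (List Int) :=
  if src_ranges = [] then []
  else
    let lo := PySem.List.pyGetD (PySem.List.pyGetD map_ranges 0 []) 1 0
    let hi := PySem.List.pyGetD (PySem.List.pyGetD map_ranges (-1) []) 2 0
    let n := map_ranges.length
    let order := PySem.List.sorted (PySem.List.pyRange 0 (n : Int) 1)
      (fun i => PySem.List.pyGetD (PySem.List.pyGetD map_ranges i []) 1 0) false
    let starts := order.map (fun i => PySem.List.pyGetD (PySem.List.pyGetD map_ranges i []) 1 0)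
    src_ranges.foldl (fun out src =>
      let s0 := PySem.List.pyGetD src 0 0
      let s1 := PySem.List.pyGetD src 1 0
      let out1 := if s0 < lo then out ++ [[s0, min s1 lo]] else out
      let out2 := if s1 > hi then out1 ++ [[max s0 hi, s1]] else out1
      let k := pvBisectLeft starts s1
      let idxs := PySem.List.sorted
        ((order.take k).filter (fun idx => PySem.List.pyGetD (PySem.List.pyGetD map_ranges idx []) 2 0 > s0))
        (fun i => i) false
      idxs.foldl (fun o i =>
        let m := PySem.List.pyGetD map_ranges i []
        let off := PySem.List.pyGetD m 0 0 - PySem.List.pyGetD m 1 0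
        o ++ [[max s0 (PySem.List.pyGetD m 1 0) + off, min s1 (PySem.List.pyGetD m 2 0) + off]]) out2) []

-- ===== PRECONDITION & SPEC =====
-- Pre_: exactly where Python A returns without IndexError: either no source ranges (the map
-- list is never touched), or the map list is nonempty, every source range has ≥ 2 entries and
-- every map range has ≥ 3 entries.
def Pre_get_dest_ranges (src_ranges : List (List Int)) (map_ranges : List (List Int)) : Prop :=
  src_ranges = [] ∨
    (map_ranges ≠ [] ∧ (∀ s ∈ src_ranges, 2 ≤ s.length) ∧ (∀ m ∈ map_ranges, 3 ≤ m.length))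
instance (src_ranges : List (List Int)) (map_ranges : List (List Int)) : Decidable (Pre_get_dest_ranges src_ranges map_ranges) := by unfold Pre_get_dest_ranges; infer_instance

def pvWitness_get_dest_ranges : List (List Int) × List (List Int) := ([[0, 5], [3, 9]], [[10, 0, 3], [20, 4, 7]])

def Spec_get_dest_ranges (src_ranges : List (List Int)) (map_ranges : List (List Int)) (out : List (List Int)) : Prop := out = get_dest_ranges_alt src_ranges map_ranges
instance (src_ranges : List (List Int)) (map_ranges : List (List Int)) (out : List (List Int)) : Decidable (Spec_get_dest_ranges src_ranges map_ranges out) := by unfold Spec_get_dest_ranges; infer_instance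

-- ===== CLAIM (what is proved, stated in full; the proofs are below) =====
def Claim_equal_get_dest_ranges : Prop := ∀ (src_ranges : List (List Int)) (map_ranges : List (List Int)), Dom_get_dest_ranges src_ranges map_ranges → Pre_get_dest_ranges src_ranges map_ranges → Spec_get_dest_ranges src_ranges map_ranges (get_dest_ranges src_ranges map_ranges)

-- ===== LEMMAS AND PROOFS =====

-- the overlap condition, the mapped piece, and the two boundary pieces, shared by both normal forms
abbrev pvCnd (s m : List Int) : Prop :=
  PySem.List.pyGetD s 0 0 < PySem.List.pyGetD m 2 0 ∧ PySem.List.pyGetD s 1 0 > PySem.List.pyGetD m 1 0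
abbrev pvPc (s m : List Int) : List Int :=
  [max (PySem.List.pyGetD s 0 0) (PySem.List.pyGetD m 1 0) +
     (PySem.List.pyGetD m 0 0 - PySem.List.pyGetD m 1 0),
   min (PySem.List.pyGetD s 1 0) (PySem.List.pyGetD m 2 0) +
     (PySem.List.pyGetD m 0 0 - PySem.List.pyGetD m 1 0)]
abbrev pvPreL (maps : List (List Int)) (s : List Int) : List (List Int) :=
  if PySem.List.pyGetD s 0 0 < PySem.List.pyGetD (PySem.List.pyGetD maps 0 []) 1 0 then
    [[PySem.List.pyGetD s 0 0,
      min (PySem.List.pyGetD s 1 0) (PySem.List.pyGetD (PySem.List.pyGetD maps 0 []) 1 0)]]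
  else []
abbrev pvSufL (maps : List (List Int)) (s : List Int) : List (List Int) :=
  if PySem.List.pyGetD s 1 0 > PySem.List.pyGetD (PySem.List.pyGetD maps (-1) []) 2 0 then
    [[max (PySem.List.pyGetD s 0 0) (PySem.List.pyGetD (PySem.List.pyGetD maps (-1) []) 2 0),
      PySem.List.pyGetD s 1 0]]
  else []
def pvF (maps : List (List Int)) (s : List Int) : List (List Int) :=
  pvPreL maps s ++ pvSufL maps s ++ (maps.filter (fun m => decide (pvCnd s m))).map (pvPc s)

-- A's inner loop collects the overlap pieces in map order
lemma pvInnerA (s : List Int) (maps : List (List Int)) (acc : List (List Int)) :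
    maps.foldl (fun acc3 map_range =>
      if PySem.List.pyGetD s 0 0 < PySem.List.pyGetD map_range 2 0 ∧
         PySem.List.pyGetD s 1 0 > PySem.List.pyGetD map_range 1 0 then
        acc3 ++ [[max (PySem.List.pyGetD s 0 0) (PySem.List.pyGetD map_range 1 0) +
                    (PySem.List.pyGetD map_range 0 0 - PySem.List.pyGetD map_range 1 0),
                  min (PySem.List.pyGetD s 1 0) (PySem.List.pyGetD map_range 2 0) +
                    (PySem.List.pyGetD map_range 0 0 - PySem.List.pyGetD map_range 1 0)]]
      else acc3) acc
    = acc ++ (maps.filter (fun m => decide (pvCnd s m))).map (pvPc s) := by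
  have h := PySem.List.foldl_append_if (fun m => decide (pvCnd s m)) (pvPc s) maps acc
  simpa [pvCnd, pvPc] using h

lemma pvA_flat (maps : List (List Int)) : ∀ (src acc : List (List Int)),
    src.foldl (fun acc src_range =>
      let acc1 :=
        if PySem.List.pyGetD src_range 0 0 < PySem.List.pyGetD (PySem.List.pyGetD maps 0 []) 1 0 then
          acc ++ [[PySem.List.pyGetD src_range 0 0,
                   min (PySem.List.pyGetD src_range 1 0) (PySem.List.pyGetD (PySem.List.pyGetD maps 0 []) 1 0)]]
        else acc
      let acc2 :=
        if PySem.List.pyGetD src_range 1 0 > PySem.List.pyGetD (PySem.List.pyGetD maps (-1) []) 2 0 then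
          acc1 ++ [[max (PySem.List.pyGetD src_range 0 0) (PySem.List.pyGetD (PySem.List.pyGetD maps (-1) []) 2 0),
                    PySem.List.pyGetD src_range 1 0]]
        else acc1
      maps.foldl (fun acc3 map_range =>
        if PySem.List.pyGetD src_range 0 0 < PySem.List.pyGetD map_range 2 0 ∧
           PySem.List.pyGetD src_range 1 0 > PySem.List.pyGetD map_range 1 0 then
          acc3 ++ [[max (PySem.List.pyGetD src_range 0 0) (PySem.List.pyGetD map_range 1 0) +
                      (PySem.List.pyGetD map_range 0 0 - PySem.List.pyGetD map_range 1 0),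
                    min (PySem.List.pyGetD src_range 1 0) (PySem.List.pyGetD map_range 2 0) +
                      (PySem.List.pyGetD map_range 0 0 - PySem.List.pyGetD map_range 1 0)]]
        else acc3) acc2) acc = acc ++ src.flatMap (pvF maps) := by
  intro src
  induction src with
  | nil => intro acc; simp
  | cons s t ih =>
    intro acc
    rw [List.foldl_cons, ih]
    simp only [pvInnerA]
    split_ifs <;> simp [pvF, pvPreL, pvSufL, pvCnd, *, List.append_assoc]

lemma pvA_eq (src maps : List (List Int)) : get_dest_ranges src maps = src.flatMap (pvF maps) := by
  unfold get_dest_ranges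
  rw [pvA_flat maps src []]
  simp

-- bisect_left on a sorted list finds the split point of the predicate (· < x)
lemma pvBisectLoop_spec (a : List Int) (x : Int) (hs : a.Pairwise (· ≤ ·)) :
    ∀ fuel lo hi, hi - lo ≤ fuel → lo ≤ hi → hi ≤ a.length →
      (∀ j (hj : j < a.length), j < lo → a[j] < x) →
      (∀ j (hj : j < a.length), hi ≤ j → x ≤ a[j]) →
      (lo ≤ pvBisectLoop a x lo hi ∧ pvBisectLoop a x lo hi ≤ hi ∧
        (∀ j (hj : j < a.length), (j < pvBisectLoop a x lo hi ↔ a[j] < x))) := by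
  have hmono : ∀ i j (hi : i < a.length) (hj : j < a.length), i ≤ j → a[i] ≤ a[j] := by
    intro i j hi hj hij
    rcases Nat.lt_or_ge i j with h | h
    · exact (List.pairwise_iff_getElem.mp hs) i j hi hj h
    · have : i = j := by omega
      subst this; exact le_refl _
  intro fuel
  induction fuel with
  | zero =>
    intro lo hi hf hlh hhl hlow hhigh
    have : lo = hi := by omega
    subst this
    rw [pvBisectLoop]
    simp only [Nat.lt_irrefl, if_false]
    refine ⟨le_refl _, le_refl _, ?_⟩
    intro j hj
    constructor
    · intro h; exact hlow j hj h
    · intro h; by_contra hc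
      exact absurd (hhigh j hj (by omega)) (by omega)
  | succ f ih =>
    intro lo hi hf hlh hhl hlow hhigh
    rw [pvBisectLoop]
    by_cases hlt : lo < hi
    · simp only [hlt, if_true]
      set mid := (lo + hi) / 2 with hmid
      have hm1 : lo ≤ mid := by omega
      have hm2 : mid < hi := by omega
      have hmlen : mid < a.length := by omega
      have hget : PySem.List.pyGetD a (mid : Int) 0 = a[mid] := by
        simp [PySem.List.pyGetD_natCast, List.getD_eq_getElem?_getD, List.getElem?_eq_getElem hmlen]
      rw [hget]
      by_cases hc : a[mid] < x
      · simp only [hc, if_true]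
        have hres := ih (mid + 1) hi (by omega) (by omega) hhl
          (by intro j hj hjlt
              have : a[j] ≤ a[mid] := hmono j mid hj hmlen (by omega)
              omega)
          hhigh
        exact ⟨by omega, hres.2.1, hres.2.2⟩
      · simp only [hc, if_false]
        have hres := ih lo mid (by omega) (by omega) (by omega) hlow
          (by intro j hj hjge
              have : a[mid] ≤ a[j] := hmono mid j hmlen hj hjge
              omega)
        exact ⟨hres.1, by omega, hres.2.2⟩
    · simp only [hlt, if_false]
      have : lo = hi := by omega
      subst this
      refine ⟨le_refl _, le_refl _, ?_⟩
      intro j hj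
      constructor
      · intro h; exact hlow j hj h
      · intro h; by_contra hc
        exact absurd (hhigh j hj (by omega)) (by omega)

-- a prefix-shaped predicate: filtering equals taking the prefix
lemma pvFilterEqTake {α : Type} (p : α → Bool) :
    ∀ (l : List α) (k : Nat), k ≤ l.length →
      (∀ j (hj : j < l.length), (p l[j] = true ↔ j < k)) → l.filter p = l.take k := by
  intro l
  induction l with
  | nil => intro k hk _; simp at hk; simp [hk]
  | cons x t ih =>
    intro k hk h
    cases k with
    | zero =>
      have hx : p x = false := by
        have := h 0 (by simp)
        simpa using this
      have ht : t.filter p = [] := by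
        apply List.filter_eq_nil_iff.mpr
        intro b hb
        obtain ⟨j, hj, rfl⟩ := List.getElem_of_mem hb
        have := h (j + 1) (by simpa using Nat.succ_lt_succ hj)
        simp only [List.getElem_cons_succ] at this
        simp [this]
      simp [hx, ht]
    | succ k' =>
      have hx : p x = true := by
        have := h 0 (by simp)
        simpa using this
      have := ih k' (by simpa using hk)
        (by intro j hj
            have := h (j + 1) (by simpa using Nat.succ_lt_succ hj)
            simpa [Nat.succ_lt_succ_iff] using this)
      simp [hx, List.take_succ_cons, this]

-- filtering/mapping indices of range equals filtering/mapping the list itself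
lemma pvIdxFilterMap {β : Type} (P : List Int → Bool) (g : List Int → β) :
    ∀ (maps : List (List Int)),
      (((List.range maps.length).filter (fun j => P (maps.getD j []))).map
        (fun j => g (maps.getD j []))) = (maps.filter P).map g := by
  intro maps
  induction maps using List.reverseRecOn with
  | nil => simp
  | append_singleton t m ih =>
    rw [List.length_append, List.length_singleton, List.range_succ]
    rw [List.filter_append, List.map_append]
    have h1 : (List.range t.length).filter (fun j => P ((t ++ [m]).getD j [])) =
        (List.range t.length).filter (fun j => P (t.getD j [])) := by
      apply List.filter_congr
      intro j hj
      rw [List.getD_append _ _ _ _ (List.mem_range.mp hj)]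
    have h2 : ((List.range t.length).filter (fun j => P (t.getD j []))).map
        (fun j => g ((t ++ [m]).getD j [])) =
        ((List.range t.length).filter (fun j => P (t.getD j []))).map
        (fun j => g (t.getD j [])) := by
      apply List.map_congr_left
      intro j hj
      have hjlen : j < t.length := List.mem_range.mp (List.mem_of_mem_filter hj)
      rw [List.getD_append _ _ _ _ hjlen]
    have h3 : (t ++ [m]).getD t.length [] = m := by
      simp
    rw [h1, h2, ih]
    by_cases hP : P m
    · simp [hP]
    · simp [hP]

-- the per-source candidate computation of B produces exactly the overlap pieces in map order
lemma pvInnerB (maps : List (List Int)) (s : List Int) :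
    (PySem.List.sorted
      (((PySem.List.sorted (PySem.List.pyRange 0 (maps.length : Int) 1)
          (fun i => PySem.List.pyGetD (PySem.List.pyGetD maps i []) 1 0) false).take
        (pvBisectLeft
          ((PySem.List.sorted (PySem.List.pyRange 0 (maps.length : Int) 1)
            (fun i => PySem.List.pyGetD (PySem.List.pyGetD maps i []) 1 0) false).map
            (fun i => PySem.List.pyGetD (PySem.List.pyGetD maps i []) 1 0))
          (PySem.List.pyGetD s 1 0))).filter
        (fun idx => PySem.List.pyGetD (PySem.List.pyGetD maps idx []) 2 0 > PySem.List.pyGetD s 0 0))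
      (fun i => i) false).map
      (fun i => pvPc s (PySem.List.pyGetD maps i []))
    = (maps.filter (fun m => decide (pvCnd s m))).map (pvPc s) := by
  set key := fun i : Int => PySem.List.pyGetD (PySem.List.pyGetD maps i []) 1 0 with hkey
  set order := PySem.List.sorted (PySem.List.pyRange 0 (maps.length : Int) 1) key false with horder
  set starts := order.map key with hstarts
  set s0 := PySem.List.pyGetD s 0 0 with hs0
  set s1 := PySem.List.pyGetD s 1 0 with hs1
  set k := pvBisectLeft starts s1 with hk
  -- bisect_left splits the sorted starts at the predicate (· < s1)
  have hsorted : starts.Pairwise (· ≤ ·) := by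
    rw [hstarts, horder]
    exact PySem.List.sorted_map_key_pairwise _ key
  have hspec := pvBisectLoop_spec starts s1 hsorted starts.length 0 starts.length
    (by omega) (by omega) (le_refl _)
    (by intro j hj h; omega) (by intro j hj h; omega)
  have hklen : k ≤ order.length := by
    have := hspec.2.1
    simpa [hk, pvBisectLeft, hstarts] using this
  -- the prefix of order taken by bisect is exactly the filter by key < s1
  have htake : order.filter (fun i => decide (key i < s1)) = order.take k := by
    apply pvFilterEqTake _ order k hklen
    intro j hj
    have hjs : j < starts.length := by simpa [hstarts] using hj
    have := hspec.2.2 j hjs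
    have hsj : starts[j] = key order[j] := by
      simp [hstarts]
    constructor
    · intro hp
      exact (this.mpr (by rw [hsj]; exact of_decide_eq_true hp))
    · intro hlt
      exact decide_eq_true (by rw [← hsj]; exact this.mp (by simpa [hk, pvBisectLeft, hstarts] using hlt))
  -- so the candidate list is order filtered by the full overlap condition
  have hcand : (order.take k).filter (fun idx => decide (PySem.List.pyGetD (PySem.List.pyGetD maps idx []) 2 0 > s0))
      = order.filter (fun i => decide (key i < s1) && decide (PySem.List.pyGetD (PySem.List.pyGetD maps i []) 2 0 > s0)) := by
    rw [← htake, List.filter_filter]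
    apply List.filter_congr
    intro i _
    simp [Bool.and_comm]
  -- sorting the candidates restores ascending index order = range filtered
  have hperm : (PySem.List.pyRange 0 (maps.length : Int) 1).Perm order := by
    exact (PySem.List.sorted_perm _ key false).symm
  set P : Int → Bool := fun i => decide (key i < s1) && decide (PySem.List.pyGetD (PySem.List.pyGetD maps i []) 2 0 > s0) with hP
  have hpermf : ((PySem.List.pyRange 0 (maps.length : Int) 1).filter P).Perm (order.filter P) :=
    hperm.filter P
  have hsortedcand : PySem.List.sorted (order.filter P) (fun i : Int => i) false
      = (PySem.List.pyRange 0 (maps.length : Int) 1).filter P := by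
    apply PySem.List.sorted_eq_of_perm_of_pairwise_lt
    · exact hpermf
    · exact (PySem.List.pairwise_lt_pyRange_one 0 (maps.length : Int)).filter P
  rw [hcand, hsortedcand]
  -- switch from Int indices over pyRange to Nat indices over List.range
  rw [PySem.List.pyRange_one, List.filter_map, List.map_map]
  simp only [Function.comp_def, zero_add, Int.sub_zero, Int.toNat_natCast]
  have h1 : (List.range maps.length).filter (fun j : Nat => P (j : Int))
      = (List.range maps.length).filter (fun j : Nat => decide (pvCnd s (maps.getD j []))) := by
    apply List.filter_congr
    intro j hj
    simp only [hP, hkey, pvCnd]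
    simp [PySem.List.pyGetD_natCast, hs0, hs1, Bool.and_comm]
  rw [h1]
  have h2 : ((List.range maps.length).filter (fun j : Nat => decide (pvCnd s (maps.getD j [])))).map
        (fun j : Nat => pvPc s (PySem.List.pyGetD maps (j : Int) []))
      = ((List.range maps.length).filter (fun j : Nat => decide (pvCnd s (maps.getD j [])))).map
        (fun j : Nat => pvPc s (maps.getD j [])) := by
    apply List.map_congr_left
    intro j hj
    simp [PySem.List.pyGetD_natCast]
  rw [h2]
  exact pvIdxFilterMap (fun m => decide (pvCnd s m)) (pvPc s) maps

lemma pvB_eq (src maps : List (List Int)) : get_dest_ranges_alt src maps = src.flatMap (pvF maps) := by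
  unfold get_dest_ranges_alt
  by_cases h : src = []
  · simp [h]
  · simp only [h, if_false]
    have hstep : ∀ (acc : List (List Int)),
        src.foldl (fun out s =>
          let s0 := PySem.List.pyGetD s 0 0
          let s1 := PySem.List.pyGetD s 1 0
          let out1 := if s0 < PySem.List.pyGetD (PySem.List.pyGetD maps 0 []) 1 0 then
              out ++ [[s0, min s1 (PySem.List.pyGetD (PySem.List.pyGetD maps 0 []) 1 0)]] else out
          let out2 := if s1 > PySem.List.pyGetD (PySem.List.pyGetD maps (-1) []) 2 0 then
              out1 ++ [[max s0 (PySem.List.pyGetD (PySem.List.pyGetD maps (-1) []) 2 0), s1]] else out1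
          let k := pvBisectLeft
            ((PySem.List.sorted (PySem.List.pyRange 0 (maps.length : Int) 1)
              (fun i => PySem.List.pyGetD (PySem.List.pyGetD maps i []) 1 0) false).map
              (fun i => PySem.List.pyGetD (PySem.List.pyGetD maps i []) 1 0)) s1
          let idxs := PySem.List.sorted
            (((PySem.List.sorted (PySem.List.pyRange 0 (maps.length : Int) 1)
                (fun i => PySem.List.pyGetD (PySem.List.pyGetD maps i []) 1 0) false).take k).filter
              (fun idx => PySem.List.pyGetD (PySem.List.pyGetD maps idx []) 2 0 > s0))
            (fun i => i) false
          idxs.foldl (fun o i =>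
            let m := PySem.List.pyGetD maps i []
            let off := PySem.List.pyGetD m 0 0 - PySem.List.pyGetD m 1 0
            o ++ [[max s0 (PySem.List.pyGetD m 1 0) + off, min s1 (PySem.List.pyGetD m 2 0) + off]]) out2) acc
        = acc ++ src.flatMap (pvF maps) := by
      clear h
      induction src with
      | nil => intro acc; simp
      | cons s t ih =>
        intro acc
        rw [List.foldl_cons, ih]
        have hinner := pvInnerB maps s
        rw [PySem.List.foldl_append_singleton_eq_map
          (fun i => pvPc s (PySem.List.pyGetD maps i []))] at *
        simp only [List.flatMap_cons]
        rw [hinner]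
        split_ifs <;> simp [pvF, pvPreL, pvSufL, *, List.append_assoc]
    exact (hstep []).trans (by simp)

-- ===== VERDICT (by name: the statement is the Claim_ definition above) =====
theorem get_dest_ranges_spec : Claim_equal_get_dest_ranges := by
  intro src maps _ _
  unfold Spec_get_dest_ranges
  rw [pvA_eq, pvB_eq]
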